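-- pv_equiv track=rewrite | github.com/anujtambi/contextenrichment | main.py | _chunk_context_sections
-- ===== SOURCE A (Python) =====
-- from typing import Dict, List, Optional, Sequence, Tuple
--
-- def _chunk_context_sections(context: str) -> List[List[str]]:
--     sections: List[List[str]] = []
--     current: List[str] = []
--     for raw_line in context.splitlines():
--         line = raw_line.strip()
--         if not line:
--             if current:
--                 sections.append(current)
--                 current = []
--             continue
--         current.append(line)
--     if current:
--         sections.append(current)
--     return sections
-- ===== SOURCE B (Python) =====
-- from typing import List
--
--
-- def _chunk_context_sections(context: str) -> List[List[str]]:
--     lines = context.splitlines()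
--     sections: List[List[str]] = []
--     i, n = 0, len(lines)
--     while i < n:
--         k = bool(lines[i].strip())
--         j = i
--         while j < n and bool(lines[j].strip()) == k:
--             j += 1
--         if k:
--             sections.append([l.strip() for l in lines[i:j]])
--         i = j
--     return sections
-- ===== Notes on version B (the rewrite author's own statement) =====
-- stated objective: alternative
-- what changed: replaces the accumulator/flush state machine by a two-pointer run scanner that finds each maximal run of same-blankness lines and slices the nonblank runs out directly
import Mathlib
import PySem

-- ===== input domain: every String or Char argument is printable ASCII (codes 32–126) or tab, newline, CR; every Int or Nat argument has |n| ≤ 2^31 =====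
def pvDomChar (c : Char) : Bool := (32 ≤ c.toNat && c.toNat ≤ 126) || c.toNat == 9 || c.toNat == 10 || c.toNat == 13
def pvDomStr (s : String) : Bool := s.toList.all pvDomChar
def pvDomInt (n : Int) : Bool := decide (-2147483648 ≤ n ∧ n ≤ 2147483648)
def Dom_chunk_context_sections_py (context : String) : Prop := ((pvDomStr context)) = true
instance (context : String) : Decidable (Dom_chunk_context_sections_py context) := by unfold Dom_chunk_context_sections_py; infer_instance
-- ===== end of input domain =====

-- B rewrites A's accumulator/flush loop as a two-pointer scan over maximal runs of
-- same-blankness lines (objective: alternative, same O(n) cost).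

-- ===== PORT A =====
-- one iteration of A's for-loop over state (sections, current)
def pvAStep (st : List (List String) × List String) (raw : String) :
    List (List String) × List String :=
  let line := PySem.Str.strip raw
  if line == "" then
    if st.2.isEmpty then st else (st.1 ++ [st.2], [])
  else (st.1, st.2 ++ [line])

def chunk_context_sections_py (context : String) : List (List String) :=
  let st := (PySem.Str.splitlines context).foldl pvAStep ([], [])
  if st.2.isEmpty then st.1 else st.1 ++ [st.2]

-- ===== PORT B =====
-- bool(line.strip())
def pvKey (raw : String) : Bool := !(PySem.Str.strip raw == "")

-- B's inner while: length of the prefix of the remaining lines whose key equals k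
def pvRunLen (k : Bool) : List String → Nat
  | [] => 0
  | x :: xs => if pvKey x == k then pvRunLen k xs + 1 else 0

-- B's outer while over indices i/j, rendered on the suffix of unprocessed lines:
-- the run lines[i:j] is x :: xs.take m (the first line always matches its own key)
def pvRuns : List String → List (List String)
  | [] => []
  | x :: xs =>
    let k := pvKey x
    let m := pvRunLen k xs
    let rest := pvRuns (xs.drop m)
    if k then ((x :: xs.take m).map PySem.Str.strip) :: rest else rest
termination_by lines => lines.length
decreasing_by
  simp only [List.length_drop, List.length_cons]
  omega

def chunk_context_sections_py_alt (context : String) : List (List String) :=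
  pvRuns (PySem.Str.splitlines context)

-- ===== PRECONDITION & SPEC =====
def Spec_chunk_context_sections_py (context : String) (out : List (List String)) : Prop := out = chunk_context_sections_py_alt context
instance (context : String) (out : List (List String)) : Decidable (Spec_chunk_context_sections_py context out) := by unfold Spec_chunk_context_sections_py; infer_instance

-- ===== CLAIM (what is proved, stated in full; the proofs are below) =====
def Claim_equal_chunk_context_sections_py : Prop := ∀ (context : String), Dom_chunk_context_sections_py context → Spec_chunk_context_sections_py context (chunk_context_sections_py context)

-- ===== LEMMAS AND PROOFS =====

-- proof helpers: what A's pending `current` contributes, expressed against B's runs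
def pvMergeFirst (c : List String) : List (List String) → List (List String)
  | [] => [c]
  | g :: rest => (c ++ g) :: rest

def pvGlue (c : List String) (lines : List String) : List (List String) :=
  match c, lines with
  | [], _ => pvRuns lines
  | c, [] => [c]
  | c, x :: _ => if pvKey x then pvMergeFirst c (pvRuns lines) else c :: pvRuns lines

lemma pvRuns_drop_false (xs : List String) :
    pvRuns (xs.drop (pvRunLen false xs)) = pvRuns xs := by
  induction xs with
  | nil => simp
  | cons y ys _ =>
    by_cases hy : pvKey y = false
    · conv_rhs => rw [pvRuns]
      simp [pvRunLen, hy]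
    · have hy' : pvKey y = true := by
        cases h : pvKey y
        · exact absurd h hy
        · rfl
      simp [pvRunLen, hy']

lemma pvRuns_cons_false (x : String) (xs : List String) (h : pvKey x = false) :
    pvRuns (x :: xs) = pvRuns xs := by
  rw [pvRuns]
  simp only [h, Bool.false_eq_true, if_false]
  exact pvRuns_drop_false xs

lemma pvRuns_cons_true_nil (x : String) (hx : pvKey x = true) :
    pvRuns [x] = [[PySem.Str.strip x]] := by
  rw [pvRuns]; simp [hx, pvRunLen, pvRuns]

lemma pvRuns_cons_true_false (x y : String) (ys : List String)
    (hx : pvKey x = true) (hy : pvKey y = false) :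
    pvRuns (x :: y :: ys) = [PySem.Str.strip x] :: pvRuns (y :: ys) := by
  rw [pvRuns]
  simp [pvRunLen, hx, hy]

lemma pvRuns_cons_true_true (x y : String) (ys : List String)
    (hx : pvKey x = true) (hy : pvKey y = true) :
    pvRuns (x :: y :: ys) =
      (PySem.Str.strip x :: PySem.Str.strip y ::
        ((ys.take (pvRunLen true ys)).map PySem.Str.strip)) ::
      pvRuns (ys.drop (pvRunLen true ys)) := by
  rw [pvRuns]
  simp [pvRunLen, hx, hy]

lemma pvRuns_cons_true_true' (y : String) (ys : List String) (hy : pvKey y = true) :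
    pvRuns (y :: ys) =
      (PySem.Str.strip y :: ((ys.take (pvRunLen true ys)).map PySem.Str.strip)) ::
      pvRuns (ys.drop (pvRunLen true ys)) := by
  rw [pvRuns]; simp [hy]

lemma pvMain (lines : List String) :
    ∀ (s : List (List String)) (c : List String),
      (let st := lines.foldl pvAStep (s, c);
       if st.2.isEmpty then st.1 else st.1 ++ [st.2]) = s ++ pvGlue c lines := by
  induction lines with
  | nil =>
    intro s c
    cases c with
    | nil => simp [pvGlue, pvRuns]
    | cons a as => simp [pvGlue]
  | cons x xs ih =>
    intro s c
    simp only [List.foldl_cons]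
    by_cases hx : pvKey x = true
    · have hs : (PySem.Str.strip x == "") = false := by
        simpa [pvKey] using hx
      have hstep : pvAStep (s, c) x = (s, c ++ [PySem.Str.strip x]) := by
        simp [pvAStep, hs]
      rw [hstep, ih]
      have hne : c ++ [PySem.Str.strip x] ≠ [] := by simp
      -- compare pvGlue (c ++ [strip x]) xs with pvGlue c (x :: xs)
      cases xs with
      | nil =>
        cases c with
        | nil => simp [pvGlue, pvRuns_cons_true_nil x hx]
        | cons a as =>
          simp [pvGlue, hx, pvRuns_cons_true_nil x hx, pvMergeFirst]
      | cons y ys =>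
        by_cases hy : pvKey y = true
        · have e1 : pvGlue (c ++ [PySem.Str.strip x]) (y :: ys) =
              pvMergeFirst (c ++ [PySem.Str.strip x]) (pvRuns (y :: ys)) := by
            cases c <;> simp [pvGlue, hy]
          have e2 : pvGlue c (x :: y :: ys) = pvMergeFirst c (pvRuns (x :: y :: ys)) := by
            cases c with
            | nil => simp [pvGlue, pvMergeFirst, pvRuns_cons_true_true x y ys hx hy]
            | cons a as => simp [pvGlue, hx]
          rw [e1, e2, pvRuns_cons_true_true x y ys hx hy, pvRuns_cons_true_true' y ys hy]
          simp [pvMergeFirst]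
        · have hy' : pvKey y = false := by
            cases h : pvKey y
            · rfl
            · exact absurd h hy
          rw [show pvGlue (c ++ [PySem.Str.strip x]) (y :: ys) =
                (c ++ [PySem.Str.strip x]) :: pvRuns (y :: ys) by
            cases c <;> simp [pvGlue, hy']]
          cases c <;>
            simp [pvGlue, hx, pvRuns_cons_true_false x y ys hx hy', pvMergeFirst]
    · have hx' : pvKey x = false := by
        cases h : pvKey x
        · rfl
        · exact absurd h hx
      have hs : (PySem.Str.strip x == "") = true := by
        simpa [pvKey] using hx'
      cases c with
      | nil =>
        have hstep : pvAStep (s, ([] : List String)) x = (s, []) := by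
          simp [pvAStep, hs]
        rw [hstep, ih]
        simp [pvGlue, pvRuns_cons_false x xs hx']
      | cons a as =>
        have hstep : pvAStep (s, a :: as) x = (s ++ [a :: as], []) := by
          simp [pvAStep, hs]
        rw [hstep, ih]
        simp [pvGlue, hx', pvRuns_cons_false x xs hx']

-- ===== VERDICT (by name: the statement is the Claim_ definition above) =====
theorem chunk_context_sections_py_spec : Claim_equal_chunk_context_sections_py := by
  intro context _
  unfold Spec_chunk_context_sections_py chunk_context_sections_py chunk_context_sections_py_alt
  have h := pvMain (PySem.Str.splitlines context) [] []
  simpa [pvGlue] using h
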